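-- pv_equiv track=rewrite | github.com/rodolfo0259/NappAcademy2-2021 | sprint2/sprint2.py | contar_ocorrencias_por_estado
-- ===== SOURCE A (Python) =====
-- def contar_ocorrencias_por_estado(lista)->dict:
--     '''
--     Conta todas as ocorrencias de fraude de cartao para cada estado
--
--     Args:
--         lista: lista de tuples (obrigatorio)
--
--     Return:
--         dict: dicionario contendo o estado e a quatidade de ocorrencias para cada
--     '''
--     count = dict()
--     for item in lista:
--         uf = (item[-3].split('/')[-1]).strip()
--         if uf in count:
--             count[uf] += 1
--         else:
--             count[uf] = 1
--
--     return count
-- ===== SOURCE B (Python) =====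
-- def contar_ocorrencias_por_estado(lista)->dict:
--     # Two-phase: extract all UFs first, then dedupe (first-occurrence order)
--     # and count each by scanning the extracted list — no incremental counter.
--     ufs = [(item[-3].split('/')[-1]).strip() for item in lista]
--     return {uf: ufs.count(uf) for uf in dict.fromkeys(ufs)}
-- ===== Notes on version B (the rewrite author's own statement) =====
-- stated objective: alternative
-- what changed: Replaces A's incremental dict-counting loop with a two-phase strategy: extract all UF strings into a list, dedupe it preserving first occurrence via dict.fromkeys, and count each distinct UF with list.count.
import Mathlib
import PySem

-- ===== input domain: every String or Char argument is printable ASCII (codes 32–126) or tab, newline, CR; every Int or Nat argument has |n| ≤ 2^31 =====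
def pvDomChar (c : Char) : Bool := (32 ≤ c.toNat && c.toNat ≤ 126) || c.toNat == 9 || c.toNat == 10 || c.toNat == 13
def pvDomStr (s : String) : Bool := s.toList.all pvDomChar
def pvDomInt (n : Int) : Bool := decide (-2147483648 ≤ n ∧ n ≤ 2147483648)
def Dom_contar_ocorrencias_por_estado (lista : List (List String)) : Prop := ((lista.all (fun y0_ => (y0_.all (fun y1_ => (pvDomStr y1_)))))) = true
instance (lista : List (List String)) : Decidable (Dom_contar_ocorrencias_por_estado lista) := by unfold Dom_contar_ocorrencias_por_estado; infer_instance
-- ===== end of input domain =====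

-- B changes the decomposition (extract-all, dedupe, count per key) — same return value; objective: alternative.

-- ===== PORT A =====
-- the extraction expression (item[-3].split('/')[-1]).strip(), identical in both Pythons
-- (pyGetD with default "" is exact under Pre_, which puts item[-3] in range; split('/') is never empty)
def pvUF (item : List String) : String :=
  PySem.Str.strip
    (PySem.List.pyGetD ((PySem.Str.split? (PySem.List.pyGetD item (-3) "") "/").getD []) (-1) "")

def contar_ocorrencias_por_estado (lista : List (List String)) : List (String × Int) :=
  (lista.foldl (fun count item =>
      let uf := pvUF item
      match count.get? uf with
      | some c => count.insert uf (c + 1)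
      | none   => count.insert uf 1)
    PySem.Dict.empty).items

-- ===== PORT B =====
def contar_ocorrencias_por_estado_alt (lista : List (List String)) : List (String × Int) :=
  let ufs := lista.map pvUF
  (PySem.List.dedup ufs).map (fun uf => (uf, (PySem.List.count ufs uf : Int)))

-- ===== PRECONDITION & SPEC =====
-- Pre_ excludes exactly the inputs where Python A raises IndexError on item[-3] (an item shorter than 3).
def Pre_contar_ocorrencias_por_estado (lista : List (List String)) : Prop :=
  ∀ item ∈ lista, 3 ≤ item.length
instance (lista : List (List String)) : Decidable (Pre_contar_ocorrencias_por_estado lista) := by unfold Pre_contar_ocorrencias_por_estado; infer_instance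

def pvWitness_contar_ocorrencias_por_estado : List (List String) :=
  [["2021", "Ana", "Campinas/SP", "12"], ["2021", "Rui", " RJ ", "3"], ["2020", "Eva", "a/SP", "7"]]

def Spec_contar_ocorrencias_por_estado (lista : List (List String)) (out : List (String × Int)) : Prop := out = contar_ocorrencias_por_estado_alt lista
instance (lista : List (List String)) (out : List (String × Int)) : Decidable (Spec_contar_ocorrencias_por_estado lista out) := by unfold Spec_contar_ocorrencias_por_estado; infer_instance

-- ===== CLAIM (what is proved, stated in full; the proofs are below) =====
def Claim_equal_contar_ocorrencias_por_estado : Prop := ∀ (lista : List (List String)), Dom_contar_ocorrencias_por_estado lista → Pre_contar_ocorrencias_por_estado lista → Spec_contar_ocorrencias_por_estado lista (contar_ocorrencias_por_estado lista)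

-- ===== LEMMAS AND PROOFS =====
-- A's loop body is the standard counter step (read-then-insert = insert of getD + 1)
theorem pv_step_eq (d : PySem.Dict String Int) (it : List String) :
    (match d.get? (pvUF it) with
     | some c => d.insert (pvUF it) (c + 1)
     | none   => d.insert (pvUF it) 1)
    = d.insert (pvUF it) (d.getD (pvUF it) 0 + 1) := by
  cases h : d.get? (pvUF it) with
  | none => simp [PySem.Dict.getD_eq_get?_getD, h]
  | some c => simp [PySem.Dict.getD_eq_get?_getD, h]

-- ===== VERDICT (by name: the statement is the Claim_ definition above) =====
theorem contar_ocorrencias_por_estado_spec : Claim_equal_contar_ocorrencias_por_estado := by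
  intro lista _ _
  unfold Spec_contar_ocorrencias_por_estado contar_ocorrencias_por_estado contar_ocorrencias_por_estado_alt
  have hfun : (fun (count : PySem.Dict String Int) item =>
      let uf := pvUF item
      match count.get? uf with
      | some c => count.insert uf (c + 1)
      | none   => count.insert uf 1)
      = fun (d : PySem.Dict String Int) item => d.insert (pvUF item) (d.getD (pvUF item) 0 + 1) :=
    funext fun d => funext fun it => pv_step_eq d it
  rw [hfun]
  rw [show (List.foldl (fun (d : PySem.Dict String Int) item => d.insert (pvUF item) (d.getD (pvUF item) 0 + 1)) PySem.Dict.empty lista)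
        = ((lista.map pvUF).foldl (fun (d : PySem.Dict String Int) x => d.insert x (d.getD x 0 + 1)) PySem.Dict.empty) from by rw [List.foldl_map]]
  rw [PySem.Dict.foldl_insert_getD_add_one_eq_counter, PySem.Dict.items_counter]
  simp [PySem.List.dedup_eq_ofList, PySem.List.count_eq]
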